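-- pv_equiv track=rewrite | github.com/narien/AoC2018 | Day16/ChronalClassification.py | cleanIdMap
-- ===== SOURCE A (Python) =====
-- def cleanIdMap(operationIdMap):
--     newIdMap = {}
--     done = False
--     while not done:
--         done = True
--         for key, value in operationIdMap.items():
--             if len(value) == 1:
--                 newIdMap[key] = value[0]
--                 for l in operationIdMap.values():
--                     if newIdMap[key] in l:
--                         l.remove(newIdMap[key])
--                 done = False
--                 break
--     return newIdMap
-- ===== SOURCE B (Python) =====
-- def _merge(xs, ys):
--     # merge two sorted index lists
--     out = []
--     a, b = 0, 0
--     while a < len(xs) and b < len(ys):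
--         if xs[a] <= ys[b]:
--             out.append(xs[a]); a += 1
--         else:
--             out.append(ys[b]); b += 1
--     return out + xs[a:] + ys[b:]
--
-- def cleanIdMap(operationIdMap):
--     # Worklist of candidate positions instead of restart-scans; does not
--     # mutate the caller's lists (A empties them in place).
--     items = [(k, list(v)) for k, v in operationIdMap.items()]
--     cand = [i for i in range(len(items)) if len(items[i][1]) == 1]
--     result = {}
--     while cand:
--         i = cand.pop(0)
--         k, l = items[i]
--         if len(l) != 1:
--             continue
--         v = l[0]
--         result[k] = v
--         fresh = []
--         for j in range(len(items)):
--             l2 = items[j][1]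
--             if v in l2:
--                 l2.remove(v)
--                 if len(l2) == 1:
--                     fresh.append(j)
--         cand = _merge(cand, fresh)
--     return result
-- ===== Notes on version B (the rewrite author's own statement) =====
-- stated objective: alternative
-- what changed: A rescans the whole dict from the start after every assignment to find the next singleton; B instead maintains a sorted worklist of candidate positions, discovering new singletons during the removal pass itself, and works on copies so the caller's lists are not emptied in place as A does.
import Mathlib
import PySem

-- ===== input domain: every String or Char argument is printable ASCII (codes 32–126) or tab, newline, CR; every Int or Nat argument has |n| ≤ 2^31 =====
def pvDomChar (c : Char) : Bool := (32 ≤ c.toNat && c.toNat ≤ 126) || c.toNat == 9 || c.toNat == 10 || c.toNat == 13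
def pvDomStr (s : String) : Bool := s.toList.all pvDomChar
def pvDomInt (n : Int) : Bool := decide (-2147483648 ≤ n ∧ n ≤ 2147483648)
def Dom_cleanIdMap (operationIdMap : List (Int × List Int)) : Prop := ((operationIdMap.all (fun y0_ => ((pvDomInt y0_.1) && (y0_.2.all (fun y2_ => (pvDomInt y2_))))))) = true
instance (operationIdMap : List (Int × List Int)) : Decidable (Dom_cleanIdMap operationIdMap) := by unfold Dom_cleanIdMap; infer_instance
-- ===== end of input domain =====

-- B replaces A's restart-the-scan-after-every-assignment loop by a sorted worklist of
-- candidate positions discovered during the removal pass (alternative decomposition, same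
-- exact result); A empties the caller's lists in place, B works on copies — the equivalence
-- proved here is about the RETURN value only.

-- ===== PORT A =====
-- dict argument decoded with Python dict semantics (duplicate keys: last value, first position)
def pvToItems (l : List (Int × List Int)) : List (Int × List Int) :=
  (PySem.Dict.ofList l).items

-- total number of remaining candidate ids (fuel bound for A's while-loop: each
-- assignment round removes at least one element, so pvSum+1 rounds suffice)
def pvSum (m : List (Int × List Int)) : Nat :=
  (m.map (fun kv => kv.2.length)).sum

-- the inner 'for key, value in … if len(value) == 1: … break' scan
def pvSingle : List (Int × List Int) → Option (Int × Int)
  | [] => none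
  | (k, v) :: rest => if v.length == 1 then some (k, v.headD 0) else pvSingle rest

-- 'for l in operationIdMap.values(): if x in l: l.remove(x)'
def pvRemoveAll (x : Int) (m : List (Int × List Int)) : List (Int × List Int) :=
  m.map (fun kv => if kv.2.contains x then (kv.1, (PySem.List.remove? kv.2 x).getD kv.2) else kv)

-- 'while not done: …' (fuel; the 0 branch is unreachable for the fuel cleanIdMap passes)
def cleanA : Nat → List (Int × List Int) → PySem.Dict Int Int → PySem.Dict Int Int
  | 0, _, nm => nm
  | f + 1, m, nm =>
    match pvSingle m with
    | none => nm
    | some (k, x) => cleanA f (pvRemoveAll x m) (nm.insert k x)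

def cleanIdMap (operationIdMap : List (Int × List Int)) : List (Int × Int) :=
  (cleanA (pvSum (pvToItems operationIdMap) + 1) (pvToItems operationIdMap) PySem.Dict.empty).items

-- ===== PORT B =====
-- _merge of two sorted position lists
def pvMerge : List Nat → List Nat → List Nat
  | [], ys => ys
  | x :: xs, [] => x :: xs
  | x :: xs, y :: ys => if x ≤ y then x :: pvMerge xs (y :: ys) else y :: pvMerge (x :: xs) ys
  termination_by xs ys => xs.length + ys.length

-- the removal pass over the positions j of items: returns (updated items, fresh singleton positions)
def pvPass (v : Int) : List (Int × List Int) → Nat → List (Int × List Int) × List Nat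
  | [], _ => ([], [])
  | kv :: rest, j =>
    let r := pvPass v rest (j + 1)
    if kv.2.contains v then
      let l' := (PySem.List.remove? kv.2 v).getD kv.2
      ((kv.1, l') :: r.1, if l'.length == 1 then j :: r.2 else r.2)
    else (kv :: r.1, r.2)

-- the initial worklist: positions whose candidate list is already a singleton
def pvInitCand (items : List (Int × List Int)) : List Nat :=
  (List.range items.length).filter (fun i => (items.getD i (0, [])).2.length == 1)

-- 'while cand: …' (fuel: every iteration pops one candidate and pushes at most one fresh
-- candidate per removed element, so pvSum+|cand|+1 iterations suffice);
-- items[i] ported as getD with a junk default — i is always in range when reached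
def cleanB : Nat → List (Int × List Int) → List Nat → PySem.Dict Int Int → PySem.Dict Int Int
  | 0, _, _, res => res
  | f + 1, items, cand, res =>
    match cand with
    | [] => res
    | i :: cand' =>
      let kl := items.getD i (0, [])
      if kl.2.length == 1 then
        let v := kl.2.headD 0
        let p := pvPass v items 0
        cleanB f p.1 (pvMerge cand' p.2) (res.insert kl.1 v)
      else cleanB f items cand' res

def cleanIdMap_alt (operationIdMap : List (Int × List Int)) : List (Int × Int) :=
  (cleanB (pvSum (pvToItems operationIdMap) + (pvToItems operationIdMap).length + 1)
    (pvToItems operationIdMap) (pvInitCand (pvToItems operationIdMap)) PySem.Dict.empty).items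

-- ===== PRECONDITION & SPEC =====
def Spec_cleanIdMap (operationIdMap : List (Int × List Int)) (out : List (Int × Int)) : Prop := out = cleanIdMap_alt operationIdMap
instance (operationIdMap : List (Int × List Int)) (out : List (Int × Int)) : Decidable (Spec_cleanIdMap operationIdMap out) := by unfold Spec_cleanIdMap; infer_instance

-- ===== CLAIM (what is proved, stated in full; the proofs are below) =====
def Claim_equal_cleanIdMap : Prop := ∀ (operationIdMap : List (Int × List Int)), Dom_cleanIdMap operationIdMap → Spec_cleanIdMap operationIdMap (cleanIdMap operationIdMap)

-- ===== LEMMAS AND PROOFS =====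

-- the worklist invariant: cand is a strictly increasing list of in-range positions whose
-- lists have at most one element left, containing every position whose list is a singleton
def pvInv (items : List (Int × List Int)) (cand : List Nat) : Prop :=
  cand.Pairwise (· < ·) ∧
  (∀ i ∈ cand, i < items.length ∧ (items.getD i (0, [])).2.length ≤ 1) ∧
  (∀ i, i < items.length → (items.getD i (0, [])).2.length = 1 → i ∈ cand)

lemma pvRemove_len (l : List Int) (v : Int) (hm : v ∈ l) :
    ((PySem.List.remove? l v).getD l).length + 1 = l.length := by
  rw [PySem.List.remove?_eq_some_erase l v hm, Option.getD_some, List.length_erase_of_mem hm]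
  have := List.length_pos_of_mem hm
  omega

lemma pvSingle_none (items : List (Int × List Int))
    (h : ∀ kv ∈ items, kv.2.length ≠ 1) : pvSingle items = none := by
  induction items with
  | nil => rfl
  | cons kv rest ih =>
    obtain ⟨k, v⟩ := kv
    have h0 := h (k, v) (List.mem_cons_self)
    simp only [pvSingle]
    rw [if_neg (by simpa using h0)]
    exact ih (fun kv hkv => h kv (List.mem_cons_of_mem _ hkv))

lemma pvSingle_min : ∀ (items : List (Int × List Int)) (i : Nat), i < items.length →
    (items.getD i (0, [])).2.length = 1 →
    (∀ j, j < i → (items.getD j (0, [])).2.length ≠ 1) →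
    pvSingle items = some ((items.getD i (0, [])).1, (items.getD i (0, [])).2.headD 0) := by
  intro items
  induction items with
  | nil => intro i h _ _; simp at h
  | cons kv rest ih =>
    intro i h h1 h2
    obtain ⟨k, v⟩ := kv
    by_cases hv : v.length = 1
    · have hi0 : i = 0 := by
        by_contra hne
        exact h2 0 (by omega) (by simpa using hv)
      subst hi0
      simp only [pvSingle]
      rw [if_pos (by simpa using hv)]
      simp
    · have hi0 : i ≠ 0 := by
        intro h0; subst h0; simp at h1; exact hv h1
      obtain ⟨i', rfl⟩ : ∃ i', i = i' + 1 := ⟨i - 1, by omega⟩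
      simp only [pvSingle]
      rw [if_neg (by simpa using hv)]
      have := ih i' (by simpa using h) (by simpa using h1)
        (fun j hj => by
          have := h2 (j + 1) (by omega)
          simpa using this)
      simpa using this

lemma pvPass_fst (v : Int) : ∀ (items : List (Int × List Int)) (j : Nat),
    (pvPass v items j).1 = pvRemoveAll v items := by
  intro items
  induction items with
  | nil => intro j; rfl
  | cons kv rest ih =>
    intro j
    simp only [pvPass, pvRemoveAll, List.map_cons]
    by_cases hc : kv.2.contains v
    · rw [if_pos hc, if_pos hc]
      dsimp only
      rw [ih (j + 1)]
      rfl
    · rw [if_neg hc, if_neg hc]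
      dsimp only
      rw [ih (j + 1)]
      rfl

lemma pvPass_snd_lb (v : Int) : ∀ (items : List (Int × List Int)) (j : Nat),
    (pvPass v items j).2.Pairwise (· < ·) ∧ ∀ x ∈ (pvPass v items j).2, j ≤ x := by
  intro items
  induction items with
  | nil => intro j; simp [pvPass]
  | cons kv rest ih =>
    intro j
    obtain ⟨hp, hlb⟩ := ih (j + 1)
    simp only [pvPass]
    by_cases hc : kv.2.contains v
    · simp only [hc, if_true]
      by_cases h1 : ((PySem.List.remove? kv.2 v).getD kv.2).length = 1
      · simp only [h1]
        constructor
        · simp only [beq_iff_eq, if_true, List.pairwise_cons]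
          exact ⟨fun x hx => by have := hlb x hx; omega, hp⟩
        · intro x hx
          simp only [beq_iff_eq, if_true, List.mem_cons] at hx
          rcases hx with rfl | hx
          · exact le_refl _
          · have := hlb x hx; omega
      · rw [if_neg (by simpa using h1)]
        exact ⟨hp, fun x hx => by have := hlb x hx; omega⟩
    · rw [if_neg hc]
      exact ⟨hp, fun x hx => by have := hlb x hx; omega⟩

lemma pvPass_snd_mem (v : Int) : ∀ (items : List (Int × List Int)) (j x : Nat),
    x ∈ (pvPass v items j).2 ↔
      ∃ t, t < items.length ∧ x = j + t ∧
        (items.getD t (0, [])).2.contains v = true ∧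
        ((PySem.List.remove? (items.getD t (0, [])).2 v).getD (items.getD t (0, [])).2).length = 1 := by
  intro items
  induction items with
  | nil => intro j x; simp [pvPass]
  | cons kv rest ih =>
    intro j x
    have split : (∃ t, t < rest.length + 1 ∧ x = j + t ∧
        ((kv :: rest).getD t (0, [])).2.contains v = true ∧
        ((PySem.List.remove? ((kv :: rest).getD t (0, [])).2 v).getD ((kv :: rest).getD t (0, [])).2).length = 1)
        ↔ ((x = j ∧ kv.2.contains v = true ∧ ((PySem.List.remove? kv.2 v).getD kv.2).length = 1)
          ∨ (∃ t, t < rest.length ∧ x = (j + 1) + t ∧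
              (rest.getD t (0, [])).2.contains v = true ∧
              ((PySem.List.remove? (rest.getD t (0, [])).2 v).getD (rest.getD t (0, [])).2).length = 1)) := by
      constructor
      · rintro ⟨t, ht, rfl, hc, hl⟩
        cases t with
        | zero =>
          rw [List.getD_cons_zero] at hc hl
          exact Or.inl ⟨by omega, hc, hl⟩
        | succ t' =>
          rw [List.getD_cons_succ] at hc hl
          exact Or.inr ⟨t', by omega, by omega, hc, hl⟩
      · rintro (⟨rfl, hc, hl⟩ | ⟨t, ht, rfl, hc, hl⟩)
        · exact ⟨0, by omega, by omega, by rw [List.getD_cons_zero]; exact hc,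
            by rw [List.getD_cons_zero]; exact hl⟩
        · exact ⟨t + 1, by omega, by omega, by rw [List.getD_cons_succ]; exact hc,
            by rw [List.getD_cons_succ]; exact hl⟩
    rw [List.length_cons, split, ← ih (j + 1) x]
    simp only [pvPass]
    by_cases hc : kv.2.contains v
    · rw [if_pos hc]
      by_cases h1 : ((PySem.List.remove? kv.2 v).getD kv.2).length = 1
      · rw [if_pos (show (((PySem.List.remove? kv.2 v).getD kv.2).length == 1) = true by simpa using h1)]
        simp only [List.mem_cons]
        constructor
        · rintro (rfl | hx)
          · exact Or.inl ⟨rfl, hc, h1⟩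
          · exact Or.inr hx
        · rintro (⟨rfl, _, _⟩ | hx)
          · exact Or.inl rfl
          · exact Or.inr hx
      · rw [if_neg (by simpa using h1)]
        constructor
        · intro hx; exact Or.inr hx
        · rintro (⟨rfl, _, hl⟩ | hx)
          · exact absurd hl h1
          · exact hx
    · rw [if_neg hc]
      constructor
      · intro hx; exact Or.inr hx
      · rintro (⟨rfl, hc', _⟩ | hx)
        · exact absurd hc' hc
        · exact hx

lemma pvPass_bound (v : Int) : ∀ (items : List (Int × List Int)) (j : Nat),
    pvSum (pvPass v items j).1 + (pvPass v items j).2.length ≤ pvSum items := by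
  intro items
  induction items with
  | nil => intro j; simp [pvPass, pvSum]
  | cons kv rest ih =>
    intro j
    have H := ih (j + 1)
    simp only [pvPass, pvSum, List.map_cons, List.sum_cons]
    by_cases hc : kv.2.contains v
    · have hlen := pvRemove_len kv.2 v (by simpa using hc)
      rw [if_pos hc]
      by_cases h1 : ((PySem.List.remove? kv.2 v).getD kv.2).length = 1
      · rw [if_pos (by simpa using h1)]
        dsimp only
        simp only [pvSum, List.map_cons, List.sum_cons, List.length_cons] at H ⊢
        omega
      · rw [if_neg (by simpa using h1)]
        dsimp only
        simp only [pvSum, List.map_cons, List.sum_cons] at H ⊢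
        omega
    · rw [if_neg hc]
      dsimp only
      simp only [pvSum, List.map_cons, List.sum_cons] at H ⊢
      omega

lemma pvRemoveAll_le (v : Int) : ∀ (items : List (Int × List Int)),
    pvSum (pvRemoveAll v items) ≤ pvSum items := by
  intro items
  induction items with
  | nil => simp [pvRemoveAll, pvSum]
  | cons kv rest ih =>
    simp only [pvRemoveAll, pvSum, List.map_cons, List.sum_cons] at ih ⊢
    by_cases hc : kv.2.contains v
    · have hlen := pvRemove_len kv.2 v (by simpa using hc)
      rw [if_pos hc]
      dsimp only
      omega
    · rw [if_neg hc]
      omega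

lemma pvRemoveAll_lt (v : Int) : ∀ (items : List (Int × List Int)) (i : Nat),
    i < items.length → v ∈ (items.getD i (0, [])).2 →
    pvSum (pvRemoveAll v items) + 1 ≤ pvSum items := by
  intro items
  induction items with
  | nil => intro i hi; simp at hi
  | cons kv rest ih =>
    intro i hi hm
    have hle := pvRemoveAll_le v rest
    simp only [pvRemoveAll, pvSum, List.map_cons, List.sum_cons] at hle ⊢
    cases i with
    | zero =>
      rw [List.getD_cons_zero] at hm
      have hlen := pvRemove_len kv.2 v hm
      rw [if_pos (by simpa using hm)]
      dsimp only
      omega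
    | succ i' =>
      rw [List.getD_cons_succ] at hm
      have := ih i' (by simp at hi; omega) hm
      simp only [pvRemoveAll, pvSum] at this
      by_cases hc : kv.2.contains v
      · have hlen := pvRemove_len kv.2 v (by simpa using hc)
        rw [if_pos hc]
        dsimp only
        omega
      · rw [if_neg hc]
        omega

lemma pvRemoveAll_length (v : Int) (items : List (Int × List Int)) :
    (pvRemoveAll v items).length = items.length := by
  simp [pvRemoveAll]

lemma pvRemoveAll_getD (v : Int) : ∀ (items : List (Int × List Int)) (j : Nat), j < items.length →
    (pvRemoveAll v items).getD j (0, []) =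
      if (items.getD j (0, [])).2.contains v then
        ((items.getD j (0, [])).1,
          (PySem.List.remove? (items.getD j (0, [])).2 v).getD (items.getD j (0, [])).2)
      else items.getD j (0, []) := by
  intro items
  induction items with
  | nil => intro j hj; simp at hj
  | cons kv rest ih =>
    intro j hj
    cases j with
    | zero =>
      simp only [pvRemoveAll, List.map_cons, List.getD_cons_zero]
    | succ j' =>
      simp only [pvRemoveAll, List.map_cons, List.getD_cons_succ]
      have := ih j' (by simp at hj; omega)
      simp only [pvRemoveAll] at this
      exact this

lemma pvMerge_mem : ∀ (xs ys : List Nat) (x : Nat), x ∈ pvMerge xs ys ↔ x ∈ xs ∨ x ∈ ys := by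
  intro xs ys
  fun_induction pvMerge xs ys with
  | case1 ys => intro x; simp
  | case2 x xs => intro z; simp
  | case3 x xs y ys h ih =>
    intro z
    simp only [pvMerge, List.mem_cons, ih]
    tauto
  | case4 x xs y ys h ih =>
    intro z
    simp only [pvMerge, List.mem_cons, ih]
    tauto

lemma pvMerge_length : ∀ (xs ys : List Nat), (pvMerge xs ys).length = xs.length + ys.length := by
  intro xs ys
  fun_induction pvMerge xs ys with
  | case1 ys => simp
  | case2 x xs => simp
  | case3 x xs y ys h ih => simp only [pvMerge, List.length_cons, ih]; omega
  | case4 x xs y ys h ih => simp only [pvMerge, List.length_cons, ih]; omega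

lemma pvMerge_sorted : ∀ (xs ys : List Nat), xs.Pairwise (· < ·) → ys.Pairwise (· < ·) →
    (∀ x ∈ xs, x ∉ ys) → (pvMerge xs ys).Pairwise (· < ·) := by
  intro xs ys
  fun_induction pvMerge xs ys with
  | case1 ys => intro _ hy _; exact hy
  | case2 x xs => intro hx _ _; exact hx
  | case3 x xs y ys h ih =>
    intro hx hy hd
    rw [List.pairwise_cons] at hx
    have hxy : x < y := by
      rcases Nat.lt_or_ge x y with h' | h'
      · exact h'
      · have hxe : x = y := by omega
        exact absurd (by simp [hxe]) (hd x (by simp))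
    refine List.pairwise_cons.mpr ⟨?_, ih hx.2 hy (fun z hz => hd z (by simp [hz]))⟩
    intro z hz
    rw [pvMerge_mem] at hz
    rcases hz with hz | hz
    · exact hx.1 z hz
    · rcases List.mem_cons.mp hz with rfl | hz
      · exact hxy
      · have := (List.pairwise_cons.mp hy).1 z hz
        omega
  | case4 x xs y ys h ih =>
    intro hx hy hd
    rw [List.pairwise_cons] at hy
    refine List.pairwise_cons.mpr ⟨?_, ih hx hy.2 (fun z hz => fun hz' => hd z hz (by simp [hz']))⟩
    intro z hz
    rw [pvMerge_mem] at hz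
    rcases hz with hz | hz
    · rcases List.mem_cons.mp hz with rfl | hz'
      · omega
      · have := (List.pairwise_cons.mp hx).1 z hz'
        omega
    · exact hy.1 z hz

-- main simulation lemma: from any state satisfying the invariant, with enough fuel on both
-- sides, B's worklist loop computes exactly what A's restart-scan loop computes
lemma pvMain : ∀ (fB fA : Nat) (items : List (Int × List Int)) (cand : List Nat)
    (res : PySem.Dict Int Int), pvInv items cand →
    pvSum items + 1 ≤ fA → pvSum items + cand.length + 1 ≤ fB →
    cleanB fB items cand res = cleanA fA items res := by
  intro fB
  induction fB with
  | zero => intro fA items cand res _ _ h; omega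
  | succ g ih =>
    intro fA items cand res hinv hfA hfB
    obtain ⟨hsort, hmem, hsing⟩ := hinv
    obtain ⟨fa, rfl⟩ : ∃ fa, fA = fa + 1 := ⟨fA - 1, by omega⟩
    cases cand with
    | nil =>
      have hnone : pvSingle items = none := by
        apply pvSingle_none
        intro kv hkv
        obtain ⟨j, hj, rfl⟩ := List.getElem_of_mem hkv
        intro hlen
        have := hsing j hj (by rw [List.getD_eq_getElem _ _ hj]; exact hlen)
        simp at this
      simp [cleanB, cleanA, hnone]
    | cons i cand' =>
      rw [List.length_cons] at hfB
      have hilt : i < items.length := (hmem i List.mem_cons_self).1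
      rcases hkl : items.getD i (0, []) with ⟨k, lst⟩
      by_cases hlen : lst.length = 1
      · -- assignment step
        obtain ⟨v, rfl⟩ : ∃ v, lst = [v] := by
          cases lst with
          | nil => simp at hlen
          | cons a t =>
            cases t with
            | nil => exact ⟨a, rfl⟩
            | cons b t' => simp at hlen
        have hminscan : ∀ j, j < i → (items.getD j (0, [])).2.length ≠ 1 := by
          intro j hj hlj
          have hjc := hsing j (by omega) hlj
          rcases List.mem_cons.mp hjc with rfl | hjc'
          · omega
          · have := (List.pairwise_cons.mp hsort).1 j hjc'
            omega
        have hA : pvSingle items = some (k, v) := by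
          have := pvSingle_min items i hilt (by rw [hkl]; rfl) hminscan
          rw [hkl] at this
          simpa using this
        have hcontains : (items.getD i (0, [])).2.contains v = true := by
          rw [hkl]; simp
        have hfst := pvPass_fst v items 0
        have hBstep : cleanB (g + 1) items (i :: cand') res =
            cleanB g (pvRemoveAll v items) (pvMerge cand' (pvPass v items 0).2)
              (res.insert k v) := by
          simp only [cleanB]
          rw [hkl]
          dsimp only
          simp only [List.headD_cons]
          rw [if_pos (show (([v].length == 1) = true) by simp), hfst]
        have hAstep : cleanA (fa + 1) items res = cleanA fa (pvRemoveAll v items)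
            (res.insert k v) := by
          simp only [cleanA, hA]
        rw [hBstep, hAstep]
        have hlen' := pvRemoveAll_length v items
        have hgetD' : ∀ j, j < items.length →
            ((pvRemoveAll v items).getD j (0, [])).2.length =
              if (items.getD j (0, [])).2.contains v then (items.getD j (0, [])).2.length - 1
              else (items.getD j (0, [])).2.length := by
          intro j hj
          rw [pvRemoveAll_getD v items j hj]
          split_ifs with hc
          · dsimp only
            have := pvRemove_len (items.getD j (0, [])).2 v (by simpa using hc)
            omega
          · rfl
        have hfreshmem : ∀ x, x ∈ (pvPass v items 0).2 ↔ x < items.length ∧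
            (items.getD x (0, [])).2.contains v = true ∧
            ((pvRemoveAll v items).getD x (0, [])).2.length = 1 := by
          intro x
          rw [pvPass_snd_mem]
          constructor
          · rintro ⟨t, ht, hx, hc, hl⟩
            obtain rfl : x = t := by omega
            refine ⟨ht, hc, ?_⟩
            rw [hgetD' x ht, if_pos hc]
            have := pvRemove_len (items.getD x (0, [])).2 v (by simpa using hc)
            omega
          · rintro ⟨hx, hc, hl⟩
            refine ⟨x, hx, by omega, hc, ?_⟩
            have h3 := hgetD' x hx
            rw [if_pos hc] at h3
            have h4 := pvRemove_len (items.getD x (0, [])).2 v (by simpa using hc)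
            omega
        have hinv' : pvInv (pvRemoveAll v items) (pvMerge cand' (pvPass v items 0).2) := by
          refine ⟨?_, ?_, ?_⟩
          · apply pvMerge_sorted
            · exact (List.pairwise_cons.mp hsort).2
            · exact (pvPass_snd_lb v items 0).1
            · intro x hx hxf
              have h1 := hmem x (List.mem_cons_of_mem _ hx)
              have h2 := (hfreshmem x).mp hxf
              have h3 := hgetD' x h2.1
              rw [if_pos h2.2.1] at h3
              omega
          · intro x hx
            rw [pvMerge_mem] at hx
            rcases hx with hx | hx
            · have h1 := hmem x (List.mem_cons_of_mem _ hx)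
              have h3 := hgetD' x h1.1
              refine ⟨by omega, ?_⟩
              rw [h3]
              split_ifs <;> omega
            · have h2 := (hfreshmem x).mp hx
              exact ⟨by omega, by omega⟩
          · intro j hj hlj
            rw [hlen'] at hj
            rw [pvMerge_mem]
            by_cases hc : (items.getD j (0, [])).2.contains v
            · right
              exact (hfreshmem j).mpr ⟨hj, hc, hlj⟩
            · left
              have h3 := hgetD' j hj
              rw [if_neg hc] at h3
              have hold : (items.getD j (0, [])).2.length = 1 := by omega
              have hjc := hsing j hj hold
              rcases List.mem_cons.mp hjc with rfl | hjc'
              · exfalso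
                have h4 := hgetD' j hj
                rw [if_pos hcontains, hkl] at h4
                have h5 : ((k, [v]) : Int × List Int).2.length - 1 = 0 := rfl
                rw [h5] at h4
                omega
              · exact hjc'
        have hvmem : v ∈ (items.getD i (0, [])).2 := by rw [hkl]; simp
        have hsum_lt := pvRemoveAll_lt v items i hilt hvmem
        have hpassb := pvPass_bound v items 0
        rw [hfst] at hpassb
        have hml := pvMerge_length cand' (pvPass v items 0).2
        exact ih fa (pvRemoveAll v items) (pvMerge cand' (pvPass v items 0).2)
          (res.insert k v) hinv' (by omega) (by omega)
      · -- stale candidate: skip it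
        have hBstep : cleanB (g + 1) items (i :: cand') res = cleanB g items cand' res := by
          simp only [cleanB]
          rw [hkl]
          dsimp only
          rw [if_neg (by simpa using hlen)]
        rw [hBstep]
        refine ih (fa + 1) items cand' res ⟨(List.pairwise_cons.mp hsort).2, ?_, ?_⟩ hfA (by omega)
        · intro x hx; exact hmem x (List.mem_cons_of_mem _ hx)
        · intro j hj hlj
          have hjc := hsing j hj hlj
          rcases List.mem_cons.mp hjc with rfl | hjc'
          · rw [hkl] at hlj; exact absurd hlj hlen
          · exact hjc'

-- ===== VERDICT (by name: the statement is the Claim_ definition above) =====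
theorem cleanIdMap_spec : Claim_equal_cleanIdMap := by
  intro l _
  unfold Spec_cleanIdMap cleanIdMap cleanIdMap_alt
  generalize pvToItems l = m
  have hinv : pvInv m (pvInitCand m) := by
    refine ⟨List.Pairwise.filter _ (List.pairwise_lt_range), ?_, ?_⟩
    · intro i hi
      rw [pvInitCand, List.mem_filter, List.mem_range] at hi
      have h2 : (m.getD i (0, [])).2.length = 1 := by simpa using hi.2
      exact ⟨hi.1, by omega⟩
    · intro i hi hlen
      rw [pvInitCand, List.mem_filter, List.mem_range]
      exact ⟨hi, by simpa using hlen⟩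
  have hclen : (pvInitCand m).length ≤ m.length := by
    rw [pvInitCand]
    exact le_trans (List.length_filter_le _ _) (by simp)
  rw [pvMain (pvSum m + m.length + 1) (pvSum m + 1) m (pvInitCand m) PySem.Dict.empty hinv
    (le_refl _) (by omega)]
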